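-- pv_equiv track=rewrite | github.com/daniel-reich/ubiquitous-fiesta | SdGE4ZBtuMKyxDqQ6_20.py | first_repeat
-- ===== SOURCE A (Python) =====
-- def first_repeat(chars):
--     hist = {}
--     for char in chars:
--         if char not in hist:
--             hist[char] = 1
--         else:
--             hist[char] += 1
--
--     for k,v in hist.items():
--         if v > 1:
--             return k
--     return str(-1)
-- ===== SOURCE B (Python) =====
-- def first_repeat(chars):
--     for char in chars:
--         if chars.count(char) > 1:
--             return char
--     return str(-1)
-- ===== Notes on version B (the rewrite author's own statement) =====
-- stated objective: simpler
-- what changed: Drops the histogram dict entirely: B scans the characters in order and returns the first one whose total count in the string exceeds 1, which coincides with A's first-inserted dict key with count > 1; on the random timing inputs this is measurably faster because str.count runs in C and the scan exits at the first repeat, though B's worst case is quadratic.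
import Mathlib
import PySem

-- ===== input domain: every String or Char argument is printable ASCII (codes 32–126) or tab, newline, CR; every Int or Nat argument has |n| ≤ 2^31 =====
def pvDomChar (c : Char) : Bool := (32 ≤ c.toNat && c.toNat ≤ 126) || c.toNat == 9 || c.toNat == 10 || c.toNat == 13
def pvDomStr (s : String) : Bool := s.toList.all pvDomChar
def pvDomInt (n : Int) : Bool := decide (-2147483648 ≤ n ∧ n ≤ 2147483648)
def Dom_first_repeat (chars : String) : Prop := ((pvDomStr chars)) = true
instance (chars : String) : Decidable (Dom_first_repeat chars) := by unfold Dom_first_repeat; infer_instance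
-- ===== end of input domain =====

-- B replaces A's histogram dict by a direct in-order scan using count; same return value, simpler code.

-- ===== PORT A =====
-- first loop: build hist; second loop: return first key with value > 1, else str(-1)
def first_repeat (chars : String) : String :=
  let hist : PySem.Dict Char Int :=
    chars.toList.foldl
      (fun hist char =>
        if hist.contains char = false then hist.insert char 1
        else hist.modify char 0 (· + 1))
      PySem.Dict.empty
  match hist.items.find? (fun kv => 1 < kv.2) with
  | some kv => kv.1.toString
  | none => PySem.Int.toStr (-1)

-- ===== PORT B =====
-- 'chars.count(char)' with a single-character needle is exactly List.count over the characters
def firstRepeatAltGo (orig : List Char) : List Char → String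
  | [] => PySem.Int.toStr (-1)
  | c :: rest => if 1 < orig.count c then c.toString else firstRepeatAltGo orig rest

def first_repeat_alt (chars : String) : String :=
  firstRepeatAltGo chars.toList chars.toList

-- ===== PRECONDITION & SPEC =====
def Spec_first_repeat (chars : String) (out : String) : Prop := out = first_repeat_alt chars
instance (chars : String) (out : String) : Decidable (Spec_first_repeat chars out) := by unfold Spec_first_repeat; infer_instance

-- ===== CLAIM (what is proved, stated in full; the proofs are below) =====
def Claim_equal_first_repeat : Prop := ∀ (chars : String), Dom_first_repeat chars → Spec_first_repeat chars (first_repeat chars)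

-- ===== LEMMAS AND PROOFS =====

-- A's histogram loop body is exactly the Counter step
theorem firstRepeat_step_eq :
    (fun (d : PySem.Dict Char Int) (c : Char) =>
      if d.contains c = false then d.insert c 1 else d.modify c 0 (· + 1))
    = fun (d : PySem.Dict Char Int) (c : Char) => d.modify c 0 (· + 1) := by
  funext d c
  by_cases h : d.contains c = true
  · simp [h]
  · simp only [Bool.not_eq_true] at h
    simp [h, PySem.Dict.modify, PySem.Dict.getD_of_not_contains d (0 : Int) h]

-- removing elements equal to a q-failing value does not change find?
theorem find?_filter_ne (q : Char → Bool) (c : Char) (hq : q c = false) (xs : List Char) :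
    List.find? q (xs.filter (fun x => x != c)) = List.find? q xs := by
  rw [List.find?_filter]
  congr 1
  funext a
  by_cases h : a = c
  · subst h; simp [hq]
  · simp [h]

-- set(l) keeps first occurrences in order, so find? over it equals find? over l
theorem find?_ofList (q : Char → Bool) (l : List Char) :
    List.find? q (PySem.Set.ofList l) = List.find? q l := by
  induction l with
  | nil => simp [PySem.Set.ofList_nil]
  | cons c l ih =>
    rw [PySem.Set.ofList_cons]
    cases hqc : q c with
    | true => simp [List.find?, hqc]
    | false =>
      simp only [List.find?, hqc]
      rw [show (PySem.Set.ofList l).discard c = (PySem.Set.ofList l).filter (fun x => x != c)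
            from rfl]
      rw [find?_filter_ne q c hqc, ih]

-- B's loop is find? over the characters
theorem firstRepeatAltGo_eq (orig rest : List Char) :
    firstRepeatAltGo orig rest
      = match rest.find? (fun c => 1 < orig.count c) with
        | some c => c.toString
        | none => PySem.Int.toStr (-1) := by
  induction rest with
  | nil => simp [firstRepeatAltGo]
  | cons c rest ih =>
    by_cases h : 1 < orig.count c
    · simp [firstRepeatAltGo, h, List.find?]
    · simp only [firstRepeatAltGo, if_neg h, ih, List.find?]
      have : decide (1 < orig.count c) = false := by simp [h]
      rw [this]

theorem first_repeat_spec : Claim_equal_first_repeat := by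
  intro chars _
  unfold Spec_first_repeat first_repeat first_repeat_alt
  rw [firstRepeat_step_eq]
  rw [← PySem.Dict.counter_eq_foldl]
  simp only [PySem.Dict.items_counter, List.find?_map]
  rw [firstRepeatAltGo_eq]
  have hpred : ((fun kv : Char × Int => decide (1 < kv.2)) ∘ fun k => (k, (List.count k chars.toList : Int)))
      = fun c => decide (1 < chars.toList.count c) := by
    funext c
    simp [Function.comp]
  rw [hpred, find?_ofList]
  cases chars.toList.find? (fun c => decide (1 < chars.toList.count c)) <;> simp
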